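-- pv_equiv track=rewrite | github.com/suminS2sumin/Programmers | 프로그래머스/0/181890. 왼쪽 오른쪽/왼쪽 오른쪽.py | solution
-- ===== SOURCE A (Python) =====
-- def solution(str_list):
--     answer = []
--     for i in range(len(str_list)):
--         if str_list[i] == "l":
--             answer = str_list[0:i]
--             break
--         elif str_list[i] == "r":
--             answer = str_list[i+1:]
--             break
--         else:
--             answer = []
--     return answer
-- ===== SOURCE B (Python) =====
-- def solution(str_list):
--     n = len(str_list)
--     li = str_list.index("l") if "l" in str_list else n
--     ri = str_list.index("r") if "r" in str_list else n
--     if li < ri: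
--         return str_list[:li]
--     if ri < li:
--         return str_list[ri + 1:]
--     return []
-- ===== Notes on version B (the rewrite author's own statement) =====
-- stated objective: alternative
-- what changed: Replaces A's single early-breaking index loop with a locate-then-decide structure: find the first positions of 'l' and 'r' independently with list.index, then compare them to pick the prefix, the suffix, or the empty result.
import Mathlib
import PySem

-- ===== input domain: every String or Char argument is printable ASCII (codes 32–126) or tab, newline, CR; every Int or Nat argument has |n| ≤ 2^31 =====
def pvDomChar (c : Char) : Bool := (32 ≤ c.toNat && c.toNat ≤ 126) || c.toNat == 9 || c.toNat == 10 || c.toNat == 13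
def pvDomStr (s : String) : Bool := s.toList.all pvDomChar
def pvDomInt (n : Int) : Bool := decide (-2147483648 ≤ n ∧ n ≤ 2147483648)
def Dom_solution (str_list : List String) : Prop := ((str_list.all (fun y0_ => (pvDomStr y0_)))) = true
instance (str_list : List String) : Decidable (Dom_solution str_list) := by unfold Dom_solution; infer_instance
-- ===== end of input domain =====

-- B is an alternative decomposition: locate both markers first, then decide by comparing positions.

-- ===== PORT A =====
-- A's for-loop over range(len) with break, carrying the 'answer' variable.
def solutionGo (str_list : List String) (i : Nat) (answer : List String) : List String :=
  if h : i < str_list.length then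
    if str_list[i] = "l" then PySem.List.slice str_list (some 0) (some (i : Int))
    else if str_list[i] = "r" then PySem.List.slice str_list (some ((i : Int) + 1)) none
    else solutionGo str_list (i + 1) []
  else answer
termination_by str_list.length - i

def solution (str_list : List String) : List String :=
  solutionGo str_list 0 []

-- ===== PORT B =====
def solution_alt (str_list : List String) : List String :=
  let n := str_list.length
  let li := if str_list.contains "l" then (PySem.List.index? str_list "l").getD 0 else n
  let ri := if str_list.contains "r" then (PySem.List.index? str_list "r").getD 0 else n
  if li < ri then PySem.List.slice str_list none (some (li : Int))
  else if ri < li then PySem.List.slice str_list (some ((ri : Int) + 1)) none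
  else []

-- ===== PRECONDITION & SPEC =====
def Spec_solution (str_list : List String) (out : List String) : Prop := out = solution_alt str_list
instance (str_list : List String) (out : List String) : Decidable (Spec_solution str_list out) := by unfold Spec_solution; infer_instance

-- ===== CLAIM (what is proved, stated in full; the proofs are below) =====
def Claim_equal_solution : Prop := ∀ (str_list : List String), Dom_solution str_list → Spec_solution str_list (solution str_list)

-- ===== LEMMAS AND PROOFS =====

-- first occurrence: if l[i] = v and nothing before index i is v, then index? = some i
lemma index?_eq_some_of_first {α : Type} [DecidableEq α] (l : List α) (v : α) (i : Nat)
    (hi : i < l.length) (hv : l[i] = v) (hfst : ∀ j (hj : j < i), l[j]'(by omega) ≠ v) :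
    PySem.List.index? l v = some i := by
  rw [PySem.List.index?_eq_some_iff]
  refine ⟨l.take i, l.drop (i + 1), ?_, ?_, ?_⟩
  · conv_lhs => rw [← List.take_append_drop i l]
    rw [← List.getElem_cons_drop hi, hv]
  · simp [List.length_take, Nat.min_eq_left (Nat.le_of_lt hi)]
  · intro hmem
    obtain ⟨j, hj, hget⟩ := List.mem_iff_getElem.mp hmem
    have hj' : j < i := by simp [List.length_take] at hj; omega
    exact hfst j hj' (by simpa [List.getElem_take] using hget)

-- main invariant: if no marker occurs before index i, the remaining loop equals B
lemma go_eq (l : List String) (i : Nat)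
    (hfst : ∀ j (_hj : j < i) (_hl : j < l.length), l[j] ≠ "l" ∧ l[j] ≠ "r") :
    solutionGo l i [] = solution_alt l := by
  induction h : l.length - i using Nat.strong_induction_on generalizing i with
  | _ n ih =>
  rw [solutionGo]
  by_cases hi : i < l.length
  · simp only [dif_pos hi]
    by_cases hL : l[i] = "l"
    · -- first "l" is at i; any "r" comes strictly later (or not at all)
      rw [if_pos hL]
      have hidx : PySem.List.index? l "l" = some i :=
        index?_eq_some_of_first l "l" i hi hL (fun j hj => (hfst j hj (by omega)).1)
      have hmemL : "l" ∈ l :=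
        (PySem.List.index?_isSome_iff (xs := l) (v := "l")).mp (by rw [hidx]; rfl)
      have hcon : l.contains "l" = true := by simpa using hmemL
      obtain ⟨ri, hriv, hrigt⟩ :
          ∃ m, (if l.contains "r" = true then (PySem.List.index? l "r").getD 0 else l.length) = m
            ∧ i < m := by
        by_cases hcr : l.contains "r" = true
        · have hmem : "r" ∈ l := by simpa using hcr
          obtain ⟨k, hk⟩ := Option.isSome_iff_exists.mp
            ((PySem.List.index?_isSome_iff (xs := l) (v := "r")).mpr hmem)
          obtain ⟨hklt, hkv, _⟩ := PySem.List.getElem_of_index?_eq_some hk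
          have hki : i ≤ k := by
            by_contra hlt
            exact (hfst k (by omega) hklt).2 hkv
          have hkne : k ≠ i := by
            intro he; subst he; rw [hkv] at hL; exact absurd hL (by decide)
          exact ⟨k, by rw [if_pos hcr, hk]; rfl, by omega⟩
        · exact ⟨l.length, by rw [if_neg hcr], hi⟩
      simp only [solution_alt]
      rw [hriv, hcon]
      simp only [if_true]
      rw [hidx, Option.getD_some, if_pos hrigt, PySem.List.slice_zero_start]
    · by_cases hR : l[i] = "r"
      · rw [if_neg hL, if_pos hR]
        have hidx : PySem.List.index? l "r" = some i :=
          index?_eq_some_of_first l "r" i hi hR (fun j hj => (hfst j hj (by omega)).2)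
        have hmemR : "r" ∈ l :=
          (PySem.List.index?_isSome_iff (xs := l) (v := "r")).mp (by rw [hidx]; rfl)
        have hcon : l.contains "r" = true := by simpa using hmemR
        obtain ⟨li, hliv, hligt⟩ :
            ∃ m, (if l.contains "l" = true then (PySem.List.index? l "l").getD 0 else l.length) = m
              ∧ i < m := by
          by_cases hcl : l.contains "l" = true
          · have hmem : "l" ∈ l := by simpa using hcl
            obtain ⟨k, hk⟩ := Option.isSome_iff_exists.mp
              ((PySem.List.index?_isSome_iff (xs := l) (v := "l")).mpr hmem)
            obtain ⟨hklt, hkv, _⟩ := PySem.List.getElem_of_index?_eq_some hk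
            have hki : i ≤ k := by
              by_contra hlt
              exact (hfst k (by omega) hklt).1 hkv
            have hkne : k ≠ i := by
              intro he; subst he; rw [hkv] at hR; exact absurd hR (by decide)
            exact ⟨k, by rw [if_pos hcl, hk]; rfl, by omega⟩
          · exact ⟨l.length, by rw [if_neg hcl], hi⟩
        simp only [solution_alt]
        rw [hliv, hcon]
        simp only [if_true]
        rw [hidx, Option.getD_some, if_neg (by omega), if_pos hligt]
      · simp only [hL, if_false, hR, if_false]
        exact ih (l.length - (i + 1)) (by omega) (i + 1)
          (fun j hj hl => by
            rcases Nat.lt_or_ge j i with hji | hji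
            · exact hfst j hji hl
            · have : j = i := by omega
              subst this; exact ⟨hL, hR⟩)
          rfl
  · -- loop exhausted: no marker anywhere, B returns []
    simp only [dif_neg hi]
    have hnol : "l" ∉ l := fun hm => by
      obtain ⟨j, hj, hg⟩ := List.mem_iff_getElem.mp hm
      exact (hfst j (by omega) hj).1 hg
    have hnor : "r" ∉ l := fun hm => by
      obtain ⟨j, hj, hg⟩ := List.mem_iff_getElem.mp hm
      exact (hfst j (by omega) hj).2 hg
    simp [solution_alt, hnol, hnor]

-- ===== VERDICT (by name: the statement is the Claim_ definition above) =====
theorem solution_spec : Claim_equal_solution := by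
  intro l _
  show solution l = solution_alt l
  exact go_eq l 0 (fun j hj _ => absurd hj (Nat.not_lt_zero j))
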